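-- pv_equiv track=rewrite | github.com/r2dev2bb8/video-poker | common.py | countMaxOccurences
-- ===== SOURCE A (Python) =====
-- def countMaxOccurences(ilst: list) -> int:
--     # Edge case
--     if len(ilst) <= 1:
--         return 1
--     # Base case
--     if len(ilst) == 2:
--         return int(ilst[0] == ilst[1]) + 1
--     # Count maximum duplicity of first character
--     times = 1
--     for i in range(2, len(ilst)):
--         ocurrencesofi = ilst.count(ilst[0] * i)
--         if ocurrencesofi == 0:
--             break
--         times = i
--     # Get the highest between the current max duplicity and the max duplicity of
--     # everything but the first character
--     return max([times, countMaxOccurences(ilst[1:])])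
-- ===== SOURCE B (Python) =====
-- def countMaxOccurences(ilst: list) -> int:
--     n = len(ilst)
--     if n <= 1:
--         return 1
--     # last occurrence index of every value, built once
--     last = {}
--     for idx, v in enumerate(ilst):
--         last[v] = idx
--     best = 2 if ilst[n - 2] == ilst[n - 1] else 1
--     for k in range(n - 3, -1, -1):
--         x = ilst[k]
--         t = 1
--         i = 2
--         while i <= n - k - 1 and last.get(x * i, -1) >= k:
--             t = i
--             i += 1
--         if t > best:
--             best = t
--     return best
-- ===== Notes on version B (the rewrite author's own statement) =====
-- stated objective: faster
-- what changed: A recomputes list.count over every suffix inside a recursion over all suffixes; B builds one value-to-last-index dict and, for each start index, scans i while the last occurrence of x*i lies inside the suffix, so every inner list scan disappears.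
import Mathlib
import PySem

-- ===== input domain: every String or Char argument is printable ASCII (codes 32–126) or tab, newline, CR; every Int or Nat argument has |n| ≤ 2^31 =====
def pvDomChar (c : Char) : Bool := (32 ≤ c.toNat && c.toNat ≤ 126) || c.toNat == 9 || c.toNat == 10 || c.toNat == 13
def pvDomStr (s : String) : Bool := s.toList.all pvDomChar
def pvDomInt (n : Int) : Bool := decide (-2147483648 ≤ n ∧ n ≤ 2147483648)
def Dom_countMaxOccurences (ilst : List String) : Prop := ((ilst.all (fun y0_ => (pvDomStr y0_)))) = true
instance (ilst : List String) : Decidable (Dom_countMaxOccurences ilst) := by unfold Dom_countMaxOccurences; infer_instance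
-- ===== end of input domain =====

-- B replaces A's recursion over all suffixes (with a linear .count scan per step) by one
-- precomputed value→last-index dict plus a bounded scan per start index (objective: faster).

-- Python's  s * i  (string repetition; empty for i ≤ 0) — exact: repeats the character sequence.
-- Shared by both ports: each Python version computes this subexpression the same way.
def pvStrMul (s : String) (i : Int) : String := String.ofList (PySem.List.pyRepeat s.toList i)

-- ===== PORT A =====
-- A's inner 'for i in range(2, len(ilst))' with its break, carrying 'times'.
def pvALoop (ilst : List String) (x : String) : List Int → Int → Int
  | [], times => times
  | i :: is, times =>
    if PySem.List.count ilst (pvStrMul x i) = 0 then times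
    else pvALoop ilst x is i

def countMaxOccurences (ilst : List String) : Int :=
  match ilst with
  | [] => 1
  | [_] => 1
  | [a, b] => (if a = b then 1 else 0) + 1
  | x :: y :: z :: rest =>
    max (pvALoop (x :: y :: z :: rest) x
          (PySem.List.pyRange 2 (PySem.List.len (x :: y :: z :: rest)) 1) 1)
        (countMaxOccurences (y :: z :: rest))   -- ilst[1:] is the tail

-- ===== PORT B =====
-- the 'last[v] = idx' loop over enumerate(ilst)
def pvLastIdx (ilst : List String) : PySem.Dict String Int :=
  (PySem.List.enumerate ilst 0).foldl (fun d p => d.insert p.2 p.1) PySem.Dict.empty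

-- the bounded 'while i <= n-k-1 and last.get(x*i, -1) >= k' loop; the fuel counts the
-- remaining admissible i values, so fuel = 0 is exactly the bound check i > n-k-1
def pvBWhile (last : PySem.Dict String Int) (x : String) (k : Int) : Nat → Int → Int → Int
  | 0, _, t => t
  | cnt + 1, i, t =>
    if last.getD (pvStrMul x i) (-1) ≥ k then pvBWhile last x k cnt (i + 1) i else t

-- body of B's 'for k in range(n-3, -1, -1)' loop (k there is nonnegative, so ilst[k] is in range)
def pvBStep (ilst : List String) (last : PySem.Dict String Int) (best k : Int) : Int :=
  let x := PySem.List.pyGetD ilst k ""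
  let t := pvBWhile last x k (PySem.List.len ilst - k - 1 - 1).toNat 2 1
  if t > best then t else best

def countMaxOccurences_alt (ilst : List String) : Int :=
  let n := PySem.List.len ilst
  if n ≤ 1 then 1
  else
    let last := pvLastIdx ilst
    let best : Int := if PySem.List.pyGetD ilst (n - 2) "" = PySem.List.pyGetD ilst (n - 1) "" then 2 else 1
    (PySem.List.pyRange (n - 3) (-1) (-1)).foldl (pvBStep ilst last) best

-- ===== PRECONDITION & SPEC =====
def Spec_countMaxOccurences (ilst : List String) (out : Int) : Prop := out = countMaxOccurences_alt ilst
instance (ilst : List String) (out : Int) : Decidable (Spec_countMaxOccurences ilst out) := by unfold Spec_countMaxOccurences; infer_instance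

-- ===== CLAIM (what is proved, stated in full; the proofs are below) =====
def Claim_equal_countMaxOccurences : Prop := ∀ (ilst : List String), Dom_countMaxOccurences ilst → Spec_countMaxOccurences ilst (countMaxOccurences ilst)

-- ===== LEMMAS AND PROOFS =====

-- The last-index dict over the whole list answers membership in any suffix.
theorem pv_last_getD (L : List String) (s : String) (k : Nat) :
    ((pvLastIdx L).getD s (-1) ≥ (k : Int)) ↔ s ∈ L.drop k := by
  induction L using List.reverseRecOn with
  | nil =>
    simp only [pvLastIdx, PySem.List.enumerate_nil, List.foldl_nil, PySem.Dict.getD_empty,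
      List.drop_nil, List.not_mem_nil, iff_false]
    omega
  | append_singleton xs a ih =>
    have hins : pvLastIdx (xs ++ [a]) = (pvLastIdx xs).insert a (xs.length : Int) := by
      simp [pvLastIdx, PySem.List.enumerate_append, PySem.List.enumerate_cons,
        PySem.List.enumerate_nil, List.foldl_append]
    rw [hins, PySem.Dict.getD_insert, List.drop_append]
    by_cases hsa : s = a
    · rw [if_pos hsa, hsa]
      simp only [List.mem_append]
      constructor
      · intro h
        have hk : k ≤ xs.length := by exact_mod_cast h
        right
        have h0 : k - xs.length = 0 := by omega
        simp [h0]
      · rintro (h | h)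
        · have hlt : k < xs.length := by
            by_contra hc
            rw [List.drop_eq_nil_iff.2 (by omega)] at h
            exact absurd h (List.not_mem_nil)
          exact_mod_cast hlt.le
        · have hk2 : List.drop (k - xs.length) [a] ≠ [] := by
            intro hnil; rw [hnil] at h; exact absurd h (List.not_mem_nil)
          have hle : ¬ ([a].length ≤ k - xs.length) := fun hle => hk2 (List.drop_eq_nil_iff.2 hle)
          simp only [List.length_cons, List.length_nil] at hle
          have : k ≤ xs.length := by omega
          exact_mod_cast this
    · rw [if_neg hsa, ih]
      simp only [List.mem_append]
      constructor
      · exact Or.inl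
      · rintro (h | h)
        · exact h
        · exact absurd (List.eq_of_mem_singleton (List.mem_of_mem_drop h)) hsa

-- A's counting loop over a suffix = B's dict-membership while loop.
theorem pv_loop (d : PySem.Dict String Int) (S : List String) (x : String) (k : Int)
    (hpred : ∀ s : String, (PySem.List.count S s = 0) ↔ ¬ (d.getD s (-1) ≥ k)) :
    ∀ (cnt : Nat) (i t : Int),
      pvALoop S x (PySem.List.pyRange i (i + cnt) 1) t = pvBWhile d x k cnt i t := by
  intro cnt
  induction cnt with
  | zero =>
    intro i t
    rw [PySem.List.pyRange_one_eq_nil (by omega)]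
    rfl
  | succ m ih =>
    intro i t
    rw [PySem.List.pyRange_one_cons (by omega)]
    have hb : i + ((m : Int) + 1) = (i + 1) + (m : Int) := by ring
    push_cast
    rw [hb]
    simp only [pvALoop, pvBWhile]
    by_cases h : d.getD (pvStrMul x i) (-1) ≥ k
    · rw [if_neg (by rw [hpred]; exact fun hc => hc h), if_pos h]
      exact ih (i + 1) i
    · rw [if_pos ((hpred _).2 h), if_neg h]

-- A's recursion over the suffixes of L = B's fold over the start indices n-3, …, k.
theorem pv_main (L : List String) (m : Nat) : ∀ (k : Nat), k + m + 2 = L.length →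
    countMaxOccurences (L.drop k) =
      (PySem.List.pyRange ((L.length : Int) - 3) ((k : Int) - 1) (-1)).foldl
        (pvBStep L (pvLastIdx L))
        (if PySem.List.pyGetD L ((L.length : Int) - 2) "" = PySem.List.pyGetD L ((L.length : Int) - 1) "" then 2 else 1) := by
  induction m with
  | zero =>
    intro k hk
    -- suffix of length 2; the fold range is empty
    rw [PySem.List.pyRange_neg_one_eq_nil (by omega), List.foldl_nil]
    have h0 : k < L.length := by omega
    have h1 : k + 1 < L.length := by omega
    rw [List.drop_eq_getElem_cons h0, List.drop_eq_getElem_cons h1,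
        List.drop_eq_nil_iff.2 (by omega)]
    have e0 : (L.length : Int) - 2 = ((k : Nat) : Int) := by omega
    have e1 : (L.length : Int) - 1 = (((k + 1 : Nat)) : Int) := by push_cast; omega
    rw [e0, e1, PySem.List.pyGetD_natCast, PySem.List.pyGetD_natCast,
        List.getD_eq_getElem _ _ h0, List.getD_eq_getElem _ _ h1]
    show (if L[k] = L[k+1] then (1:Int) else 0) + 1 = if L[k] = L[k+1] then 2 else 1
    split_ifs <;> norm_num
  | succ m ih =>
    intro k hk
    have h0 : k < L.length := by omega
    have h1 : k + 1 < L.length := by omega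
    have h2 : k + 2 < L.length := by omega
    -- split the descending range at its last element k
    have hsplit : PySem.List.pyRange ((L.length : Int) - 3) ((k : Int) - 1) (-1)
        = PySem.List.pyRange ((L.length : Int) - 3) ((k : Int)) (-1) ++ [(k : Int)] := by
      rw [PySem.List.pyRange_neg_one_eq_reverse, PySem.List.pyRange_neg_one_eq_reverse]
      have hb : (k : Int) - 1 + 1 = (k : Int) := by ring
      rw [hb, PySem.List.pyRange_one_cons (by omega), List.reverse_cons]
    rw [hsplit, List.foldl_append, List.foldl_cons, List.foldl_nil]
    have hih := ih (k + 1) (by omega)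
    have ecast : ((k + 1 : Nat) : Int) - 1 = (k : Int) := by push_cast; ring
    rw [ecast] at hih
    rw [← hih]
    -- unfold A on the three-cons suffix
    have hS : L.drop k = L[k] :: L[k+1] :: L[k+2] :: L.drop (k+3) := by
      rw [List.drop_eq_getElem_cons h0, List.drop_eq_getElem_cons h1, List.drop_eq_getElem_cons h2]
    have hS1 : L.drop (k+1) = L[k+1] :: L[k+2] :: L.drop (k+3) := by
      rw [List.drop_eq_getElem_cons h1, List.drop_eq_getElem_cons h2]
    rw [hS]
    show max (pvALoop (L[k] :: L[k+1] :: L[k+2] :: L.drop (k+3)) L[k]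
          (PySem.List.pyRange 2 (PySem.List.len (L[k] :: L[k+1] :: L[k+2] :: L.drop (k+3))) 1) 1)
        (countMaxOccurences (L[k+1] :: L[k+2] :: L.drop (k+3)))
      = pvBStep L (pvLastIdx L) (countMaxOccurences (L.drop (k+1))) (k : Int)
    rw [← hS, ← hS1]
    -- the A-side loop equals B's while loop
    have hlen : PySem.List.len (L.drop k) = 2 + ((m + 1 : Nat) : Int) := by
      rw [PySem.List.len_eq, List.length_drop]; push_cast; omega
    have hpred : ∀ s : String,
        (PySem.List.count (L.drop k) s = 0) ↔ ¬ ((pvLastIdx L).getD s (-1) ≥ (k : Int)) := by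
      intro s
      rw [PySem.List.count_eq, List.count_eq_zero, pv_last_getD]
    rw [hlen, pv_loop (pvLastIdx L) (L.drop k) L[k] (k : Int) hpred (m+1) 2 1]
    -- reduce B's step
    show _ = pvBStep L (pvLastIdx L) (countMaxOccurences (L.drop (k+1))) (k : Int)
    unfold pvBStep
    have hx : PySem.List.pyGetD L (k : Int) "" = L[k] := by
      rw [PySem.List.pyGetD_natCast, List.getD_eq_getElem _ _ h0]
    have hfuel : (PySem.List.len L - (k : Int) - 1 - 1).toNat = m + 1 := by
      rw [PySem.List.len_eq]; omega
    rw [hx, hfuel]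
    rw [max_def]
    simp only []
    split_ifs with hle hgt hgt
    · omega
    · rfl
    · rfl
    · omega

-- ===== VERDICT (by name: the statement is the Claim_ definition above) =====
theorem countMaxOccurences_spec : Claim_equal_countMaxOccurences := by
  intro ilst _
  unfold Spec_countMaxOccurences
  match hcase : ilst with
  | [] => rfl
  | [s] => rfl
  | x :: y :: rest =>
    have h2 : 2 ≤ ilst.length := by rw [hcase]; simp
    rw [← hcase]
    have hmain := pv_main ilst (ilst.length - 2) 0 (by omega)
    have e0 : ((0 : Nat) : Int) - 1 = -1 := by norm_num
    rw [e0, List.drop_zero] at hmain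
    have halt : countMaxOccurences_alt ilst
        = (PySem.List.pyRange ((ilst.length : Int) - 3) (-1) (-1)).foldl
            (pvBStep ilst (pvLastIdx ilst))
            (if PySem.List.pyGetD ilst ((ilst.length : Int) - 2) ""
                = PySem.List.pyGetD ilst ((ilst.length : Int) - 1) "" then 2 else 1) := by
      simp only [countMaxOccurences_alt, PySem.List.len_eq]
      rw [if_neg (show ¬ ((ilst.length : Int) ≤ 1) by omega)]
      rfl
    rw [halt, hmain]
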